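-- pv_equiv track=rewrite | github.com/vali7394/python-examples | python-examples/day-3.py | find_char_type
-- ===== SOURCE A (Python) =====
-- def find_char_type(sentence):
--     char_type_dict = {"DIGITS": 0, "LETTERS": 0}
--     for i in sentence:
--         if i.isnumeric():
--             char_type_dict["DIGITS"] += 1
--         else:
--             char_type_dict["LETTERS"] += 1
--     return char_type_dict
-- ===== SOURCE B (Python) =====
-- def find_char_type(sentence):
--     freq = {}
--     for ch in sentence:
--         freq[ch] = freq.get(ch, 0) + 1
--     digits = sum(freq.get(d, 0) for d in "0123456789")
--     return {"DIGITS": digits, "LETTERS": len(sentence) - digits}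
-- ===== Notes on version B (the rewrite author's own statement) =====
-- stated objective: alternative
-- what changed: B builds a per-character frequency histogram (dict) in one pass and then aggregates the counts of the ten digit keys, deriving LETTERS as the length minus that sum, instead of A's per-character two-way branch incrementing two named counters.
import Mathlib
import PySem

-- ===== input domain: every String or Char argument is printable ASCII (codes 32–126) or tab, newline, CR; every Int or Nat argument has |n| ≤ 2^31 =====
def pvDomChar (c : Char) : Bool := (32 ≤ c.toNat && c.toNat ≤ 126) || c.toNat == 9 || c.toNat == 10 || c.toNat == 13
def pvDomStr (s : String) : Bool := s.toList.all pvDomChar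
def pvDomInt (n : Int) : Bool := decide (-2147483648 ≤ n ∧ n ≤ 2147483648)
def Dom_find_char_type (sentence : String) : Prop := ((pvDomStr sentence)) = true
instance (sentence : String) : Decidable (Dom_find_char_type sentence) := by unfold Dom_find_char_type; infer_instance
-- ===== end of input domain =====

-- B builds a per-character frequency dict in one pass, then aggregates the ten digit keys and derives LETTERS by subtraction, instead of A's two-way per-character branch on two named counters. No argument mutation.
-- ===== PORT A =====
-- i.isnumeric() is exact as Chars.isdigit on the printable-ASCII domain Dom_find_char_type;
-- d["DIGITS"] += 1 is ported as Dict.modify with default 0 — exact here since both keys are always present.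
def find_char_type (sentence : String) : List (String × Int) :=
  (sentence.toList.foldl
    (fun d c =>
      if PySem.Chars.isdigit c then d.modify "DIGITS" (0 : Int) (· + 1)
      else d.modify "LETTERS" (0 : Int) (· + 1))
    (PySem.Dict.ofList [("DIGITS", (0 : Int)), ("LETTERS", (0 : Int))])).items

-- ===== PORT B =====
-- freq[ch] = freq.get(ch, 0) + 1 is Dict.insert with Dict.getD (exact); sum(freq.get(d, 0) for d in "0123456789") is the sum of the mapped getD values.
def find_char_type_alt (sentence : String) : List (String × Int) :=
  let freq : PySem.Dict Char Int :=
    sentence.toList.foldl (fun d ch => d.insert ch (d.getD ch 0 + 1)) PySem.Dict.empty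
  let digits : Int := ("0123456789".toList.map (fun d => freq.getD d 0)).sum
  [("DIGITS", digits), ("LETTERS", (sentence.toList.length : Int) - digits)]

-- ===== PRECONDITION & SPEC =====
def Spec_find_char_type (sentence : String) (out : List (String × Int)) : Prop := out = find_char_type_alt sentence
instance (sentence : String) (out : List (String × Int)) : Decidable (Spec_find_char_type sentence out) := by unfold Spec_find_char_type; infer_instance

-- ===== CLAIM (what is proved, stated in full; the proofs are below) =====
def Claim_equal_find_char_type : Prop := ∀ (sentence : String), Dom_find_char_type sentence → Spec_find_char_type sentence (find_char_type sentence)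

-- ===== LEMMAS AND PROOFS =====

-- A's loop invariant: the fold over the literal two-key dict accumulates the two counts
theorem find_char_type_loopA (cs : List Char) : ∀ (a b : Int),
    cs.foldl
      (fun d c =>
        if PySem.Chars.isdigit c then d.modify "DIGITS" (0 : Int) (· + 1)
        else d.modify "LETTERS" (0 : Int) (· + 1))
      (PySem.Dict.mk [("DIGITS", a), ("LETTERS", b)]) =
    PySem.Dict.mk [("DIGITS", a + ((cs.filter (fun c => PySem.Chars.isdigit c)).length : Int)),
      ("LETTERS", b + ((cs.filter (fun c => !PySem.Chars.isdigit c)).length : Int))] := by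
  induction cs with
  | nil => intro a b; simp
  | cons c cs ih =>
    intro a b
    rw [List.foldl_cons]
    by_cases h : PySem.Chars.isdigit c = true
    · have hstep : (if PySem.Chars.isdigit c then
          (PySem.Dict.mk [("DIGITS", a), ("LETTERS", b)]).modify "DIGITS" (0 : Int) (· + 1)
        else (PySem.Dict.mk [("DIGITS", a), ("LETTERS", b)]).modify "LETTERS" (0 : Int) (· + 1))
          = PySem.Dict.mk [("DIGITS", a + 1), ("LETTERS", b)] := by
        simp [h, PySem.Dict.modify, PySem.Dict.getD, PySem.Dict.get?, PySem.Dict.insert,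
          PySem.Dict.contains]
      rw [hstep, ih]
      simp [h]
      ring
    · have hstep : (if PySem.Chars.isdigit c then
          (PySem.Dict.mk [("DIGITS", a), ("LETTERS", b)]).modify "DIGITS" (0 : Int) (· + 1)
        else (PySem.Dict.mk [("DIGITS", a), ("LETTERS", b)]).modify "LETTERS" (0 : Int) (· + 1))
          = PySem.Dict.mk [("DIGITS", a), ("LETTERS", b + 1)] := by
        simp [h, PySem.Dict.modify, PySem.Dict.getD, PySem.Dict.get?, PySem.Dict.insert,
          PySem.Dict.contains]
      rw [hstep, ih]
      simp [h]
      ring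

-- every char in the digit range is one of the ten digit literals
theorem digit_enum (x : Char) (h : PySem.Chars.isdigit x = true) :
    x = '0' ∨ x = '1' ∨ x = '2' ∨ x = '3' ∨ x = '4' ∨ x = '5' ∨ x = '6' ∨ x = '7' ∨ x = '8' ∨ x = '9' := by
  simp [PySem.Chars.isdigit, Char.le_def, UInt32.le_iff_toNat_le] at h
  obtain ⟨h1, h2⟩ := h
  rw [show x = Char.ofNat x.toNat from (Char.ofNat_toNat x).symm]
  interval_cases hx : x.toNat <;> decide

-- per-character bridge: the ten equality indicators sum to the digit indicator
theorem digit_indicator (x : Char) :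
    ((['0','1','2','3','4','5','6','7','8','9'].map
        (fun d => if (d == x : Bool) then (1 : Int) else 0)).sum)
      = if PySem.Chars.isdigit x then 1 else 0 := by
  by_cases h : PySem.Chars.isdigit x = true
  · rcases digit_enum x h with rfl | rfl | rfl | rfl | rfl | rfl | rfl | rfl | rfl | rfl <;> decide
  · have z : ∀ d : Char, PySem.Chars.isdigit d = true →
        (if (d == x : Bool) then (1 : Int) else 0) = 0 := by
      intro d hd
      rw [if_neg]
      intro hb
      exact h (beq_iff_eq.mp hb ▸ hd)
    simp only [List.map_cons, List.map_nil, List.sum_cons, List.sum_nil,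
      z '0' (by decide), z '1' (by decide), z '2' (by decide), z '3' (by decide),
      z '4' (by decide), z '5' (by decide), z '6' (by decide), z '7' (by decide),
      z '8' (by decide), z '9' (by decide)]
    simp [h]

-- summing the per-digit occurrence counts equals counting the digit characters
theorem sum_counts (cs : List Char) :
    ((['0','1','2','3','4','5','6','7','8','9'].map (fun d => (cs.count d : Int))).sum)
      = ((cs.filter (fun c => PySem.Chars.isdigit c)).length : Int) := by
  induction cs with
  | nil => simp
  | cons x cs ih =>
    have hcnt : ∀ d : Char, ((x :: cs).count d : Int) = (cs.count d : Int) + (if (d == x : Bool) then (1 : Int) else 0) := by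
      intro d
      rw [List.count_cons]
      rcases eq_or_ne d x with rfl | hne
      · simp
      · simp [hne, Ne.symm hne]
    simp only [hcnt]
    rw [PySem.List.sum_map_add_int, ih, digit_indicator]
    rw [List.filter_cons]
    by_cases h : PySem.Chars.isdigit x = true <;> simp [h] <;> ring

theorem find_char_type_spec : Claim_equal_find_char_type := by
  intro s _
  unfold Spec_find_char_type find_char_type find_char_type_alt
  rw [show PySem.Dict.ofList [("DIGITS", (0 : Int)), ("LETTERS", (0 : Int))]
      = PySem.Dict.mk [("DIGITS", (0 : Int)), ("LETTERS", (0 : Int))] from rfl]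
  rw [find_char_type_loopA]
  rw [show (s.toList.foldl (fun d ch => d.insert ch (d.getD ch 0 + 1)) PySem.Dict.empty)
      = PySem.Dict.counter s.toList from PySem.Dict.foldl_insert_getD_add_one_eq_counter s.toList]
  simp only [PySem.Dict.getD_counter]
  rw [show "0123456789".toList = ['0','1','2','3','4','5','6','7','8','9'] from by decide]
  rw [sum_counts s.toList]
  have h1 := List.length_eq_length_filter_add (l := s.toList) (fun c => PySem.Chars.isdigit c)
  have h2 : s.toList.length = s.length := String.length_toList
  simp
  omega
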